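-- pv_equiv track=rewrite | github.com/yordlejason/m0l0c0 | q1.py | equalsWhenOneCharRemoved
-- ===== SOURCE A (Python) =====
-- def equalsWhenOneCharRemoved(x, y):
--     '''
--     >>> equalsWhenOneCharRemoved("x", "y")
--     False
--     >>> equalsWhenOneCharRemoved("x", "XX")
--     False
--     >>> equalsWhenOneCharRemoved("yy", "yx")
--     False
--     >>> equalsWhenOneCharRemoved("abcd", "abxcd")
--     True
--     >>> equalsWhenOneCharRemoved("xyz", "xz")
--     True
--     '''
--     lx, ly = len(x), len(y)
--     # for early termination
--     if abs(lx-ly) != 1: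
--         return False
--
--     i = j = 0
--     removed = False
--     # scan
--     while i < lx and j < ly:
--         if x[i] != y[j]:
--             # removed previously? then donen with the iteration
--             if removed:
--                 return False
--             if lx > ly:
--                 i += 1
--             else:
--                 j += 1
--             removed = True
--         else:
--             i += 1
--             j += 1
--     return True
-- ===== SOURCE B (Python) =====
-- def equalsWhenOneCharRemoved(x, y):
--     if abs(len(x) - len(y)) != 1:
--         return False
--     longer, shorter = (x, y) if len(x) > len(y) else (y, x)
--     for i in range(len(shorter)):
--         if longer[i] != shorter[i]:
--             return longer[i+1:] == shorter[i:]
--     return True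
-- ===== Notes on version B (the rewrite author's own statement) =====
-- stated objective: simpler
-- what changed: Replaces the dual-pointer scan with a removed flag by: pick longer/shorter, find the first divergence index, and decide with one suffix-slice equality (no flag state, no second pointer).
import Mathlib
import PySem

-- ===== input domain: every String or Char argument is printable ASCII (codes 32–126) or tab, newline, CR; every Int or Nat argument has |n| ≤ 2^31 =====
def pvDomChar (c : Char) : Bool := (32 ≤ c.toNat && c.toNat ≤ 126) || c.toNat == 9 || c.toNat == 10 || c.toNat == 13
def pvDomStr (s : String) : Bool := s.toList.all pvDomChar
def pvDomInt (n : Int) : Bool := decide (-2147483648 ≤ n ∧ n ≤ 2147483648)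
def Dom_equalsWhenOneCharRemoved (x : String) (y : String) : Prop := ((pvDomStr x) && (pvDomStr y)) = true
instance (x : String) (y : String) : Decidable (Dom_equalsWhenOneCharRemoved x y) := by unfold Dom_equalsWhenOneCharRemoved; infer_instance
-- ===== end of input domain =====

-- B replaces A's dual-pointer/removed-flag scan by find-first-divergence + one suffix equality: simpler.

-- ===== PORT A =====
-- A's while loop: indices i into x, j into y, flag `removed`; the dite guard mirrors `i < lx and j < ly`.
def pvALoop (xs ys : List Char) (i j : Nat) (removed : Bool) : Bool :=
  if h : i < xs.length ∧ j < ys.length then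
    if xs[i]'h.1 ≠ ys[j]'h.2 then
      if removed then false
      else if xs.length > ys.length then pvALoop xs ys (i+1) j true
      else pvALoop xs ys i (j+1) true
    else pvALoop xs ys (i+1) (j+1) removed
  else true
termination_by (xs.length - i) + (ys.length - j)
decreasing_by all_goals omega

def equalsWhenOneCharRemoved (x : String) (y : String) : Bool :=
  let lx := x.toList.length
  let ly := y.toList.length
  if ((lx : Int) - (ly : Int)).natAbs ≠ 1 then false
  else pvALoop x.toList y.toList 0 0 false

-- ===== PORT B =====
-- B's for loop over positions of the shorter string; `lg[i]?` is always in range on actual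
-- calls (lg is the longer string); `List.drop` is the Python suffix slice s[i:].
def pvBLoop (lg sh : List Char) (i : Nat) : Bool :=
  if h : i < sh.length then
    if lg[i]? ≠ some (sh[i]'h) then decide (lg.drop (i+1) = sh.drop i)
    else pvBLoop lg sh (i+1)
  else true
termination_by sh.length - i

def equalsWhenOneCharRemoved_alt (x : String) (y : String) : Bool :=
  if ((x.toList.length : Int) - (y.toList.length : Int)).natAbs ≠ 1 then false
  else if x.toList.length > y.toList.length then pvBLoop x.toList y.toList 0
  else pvBLoop y.toList x.toList 0

-- ===== PRECONDITION & SPEC =====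
def Spec_equalsWhenOneCharRemoved (x : String) (y : String) (out : Bool) : Prop := out = equalsWhenOneCharRemoved_alt x y
instance (x : String) (y : String) (out : Bool) : Decidable (Spec_equalsWhenOneCharRemoved x y out) := by unfold Spec_equalsWhenOneCharRemoved; infer_instance

-- ===== CLAIM (what is proved, stated in full; the proofs are below) =====
def Claim_equal_equalsWhenOneCharRemoved : Prop := ∀ (x : String) (y : String), Dom_equalsWhenOneCharRemoved x y → Spec_equalsWhenOneCharRemoved x y (equalsWhenOneCharRemoved x y)

-- ===== LEMMAS AND PROOFS =====

-- After the removal happened, A's loop is a plain suffix-equality check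
-- (the remaining lengths are equal).
theorem pvALoop_removed (xs ys : List Char) (i j : Nat)
    (hlen : xs.length + j = ys.length + i) :
    pvALoop xs ys i j true = decide (xs.drop i = ys.drop j) := by
  rw [pvALoop]
  by_cases h : i < xs.length ∧ j < ys.length
  · rw [dif_pos h]
    by_cases hc : xs[i]'h.1 = ys[j]'h.2
    · rw [if_neg (by simpa using hc),
        pvALoop_removed xs ys (i+1) (j+1) (by omega),
        decide_eq_decide,
        List.drop_eq_getElem_cons h.1, List.drop_eq_getElem_cons h.2,
        List.cons_eq_cons]
      exact (and_iff_right hc).symm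
    · rw [if_pos (by simpa using hc), if_pos rfl]
      have hne : ¬ (xs.drop i = ys.drop j) := by
        rw [List.drop_eq_getElem_cons h.1, List.drop_eq_getElem_cons h.2,
          List.cons_eq_cons]
        exact fun e => hc e.1
      simp [hne]
  · rw [dif_neg h, List.drop_eq_nil_of_le (by omega), List.drop_eq_nil_of_le (by omega)]
    simp
termination_by xs.length - i
decreasing_by omega

-- Before the removal, with x the longer string, A's scan equals B's scan.
theorem pvALoop_eq_bLoop_left (xs ys : List Char) (i : Nat)
    (hlen : xs.length = ys.length + 1) :
    pvALoop xs ys i i false = pvBLoop xs ys i := by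
  rw [pvALoop, pvBLoop]
  by_cases h : i < ys.length
  · have hx : i < xs.length := by omega
    rw [dif_pos ⟨hx, h⟩, dif_pos h]
    by_cases hc : xs[i]'hx = ys[i]'h
    · rw [if_neg (by simpa using hc),
        if_neg (show ¬ xs[i]? ≠ some (ys[i]'h) by
          simp [List.getElem?_eq_getElem hx, hc])]
      exact pvALoop_eq_bLoop_left xs ys (i+1) hlen
    · rw [if_pos (by simpa using hc),
        if_neg Bool.false_ne_true,
        if_pos (show xs.length > ys.length by omega),
        if_pos (show xs[i]? ≠ some (ys[i]'h) by
          simp [List.getElem?_eq_getElem hx]; exact hc)]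
      exact pvALoop_removed xs ys (i+1) i (by omega)
  · rw [dif_neg (by omega), dif_neg h]
termination_by ys.length - i
decreasing_by omega

-- Before the removal, with y the longer string, A's scan equals B's scan
-- (B's loop takes the longer list first).
theorem pvALoop_eq_bLoop_right (xs ys : List Char) (i : Nat)
    (hlen : ys.length = xs.length + 1) :
    pvALoop xs ys i i false = pvBLoop ys xs i := by
  rw [pvALoop, pvBLoop]
  by_cases h : i < xs.length
  · have hy : i < ys.length := by omega
    rw [dif_pos ⟨h, hy⟩, dif_pos h]
    by_cases hc : xs[i]'h = ys[i]'hy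
    · rw [if_neg (by simpa using hc),
        if_neg (show ¬ ys[i]? ≠ some (xs[i]'h) by
          simp [List.getElem?_eq_getElem hy, hc.symm])]
      exact pvALoop_eq_bLoop_right xs ys (i+1) hlen
    · rw [if_pos (by simpa using hc),
        if_neg Bool.false_ne_true,
        if_neg (show ¬ xs.length > ys.length by omega),
        if_pos (show ys[i]? ≠ some (xs[i]'h) by
          simp [List.getElem?_eq_getElem hy]; exact fun e => hc e.symm),
        pvALoop_removed xs ys i (i+1) (by omega),
        decide_eq_decide]
      exact eq_comm
  · rw [dif_neg (by omega), dif_neg h]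
termination_by xs.length - i
decreasing_by omega

-- ===== VERDICT (by name: the statement is the Claim_ definition above) =====
theorem equalsWhenOneCharRemoved_spec : Claim_equal_equalsWhenOneCharRemoved := by
  intro x y _
  unfold Spec_equalsWhenOneCharRemoved equalsWhenOneCharRemoved equalsWhenOneCharRemoved_alt
  by_cases hg : ((x.toList.length : Int) - (y.toList.length : Int)).natAbs ≠ 1
  · rw [if_pos hg, if_pos hg]
  · rw [if_neg hg, if_neg hg]
    have h1 : x.toList.length = y.toList.length + 1 ∨ y.toList.length = x.toList.length + 1 := by
      omega
    rcases h1 with h | h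
    · rw [if_pos (show x.toList.length > y.toList.length by omega)]
      exact pvALoop_eq_bLoop_left x.toList y.toList 0 h
    · rw [if_neg (show ¬ x.toList.length > y.toList.length by omega)]
      exact pvALoop_eq_bLoop_right x.toList y.toList 0 h
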